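-- pv_equiv track=rewrite | github.com/francoisgirard51/MrPython_exercices | strings1.py | remove_if
-- ===== SOURCE A (Python) =====
-- def remove_if(s:str, char:str, n:int)->str:
--     '''Preconditions: s is a character string, char is a character, n is a strictly positive integer
--     returns the string obtained from s by removing the blocks containing n occurrences of char in a row.
--     '''
--     i: int = 0
--     p: str = s
--     while i < len(p):
--         j: int = i
--         while j < len(p) and p[j] == char:
--             j = j + 1
--         if j - i == n:
--             p = p[:i] + p[j:]
--         else:
--             i = j + 1
--     return p
-- ===== SOURCE B (Python) =====
-- def remove_if(s: str, char: str, n: int) -> str: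
--     # One left-to-right pass: split s into maximal runs of char, drop runs of
--     # length exactly n, keep everything else; no repeated string splicing.
--     out = []
--     i = 0
--     L = len(s)
--     while i < L:
--         if s[i] == char:
--             j = i
--             while j < L and s[j] == char:
--                 j += 1
--             if j - i != n:
--                 out.append(s[i:j])
--             i = j
--         else:
--             out.append(s[i])
--             i += 1
--     return "".join(out)
-- ===== Notes on version B (the rewrite author's own statement) =====
-- stated objective: alternative
-- what changed: B replaces A's repeated in-place string splicing with rescans (p = p[:i] + p[j:] inside the loop) by a single left-to-right pass that groups maximal runs of char, drops runs of length exactly n, and joins the kept pieces at the end.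
import Mathlib
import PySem

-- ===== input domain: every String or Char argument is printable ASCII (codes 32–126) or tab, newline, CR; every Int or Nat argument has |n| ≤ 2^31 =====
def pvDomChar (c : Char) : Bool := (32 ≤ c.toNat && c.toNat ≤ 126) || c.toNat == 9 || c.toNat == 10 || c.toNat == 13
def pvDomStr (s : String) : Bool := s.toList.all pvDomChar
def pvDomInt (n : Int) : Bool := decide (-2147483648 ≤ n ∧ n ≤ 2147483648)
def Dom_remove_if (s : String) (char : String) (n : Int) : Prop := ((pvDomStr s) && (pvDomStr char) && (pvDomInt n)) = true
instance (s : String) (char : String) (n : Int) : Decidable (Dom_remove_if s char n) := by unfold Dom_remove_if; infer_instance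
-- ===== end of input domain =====

-- B replaces A's repeated in-place string splicing and rescanning by a single
-- left-to-right pass that groups maximal runs of `char`, drops runs of length
-- exactly n, and joins the kept pieces (objective: alternative; intended as
-- faster, but a timing run measured only ~1.4x at the largest size).

-- ===== PORT A =====
-- inner while loop: `while j < len(p) and p[j] == char: j = j + 1`
def scanA (char : String) (p : List Char) (j : Nat) : Nat :=
  if h : j < p.length then
    if String.mk [p[j]] = char then scanA char p (j + 1) else j
  else j
termination_by p.length - j

-- outer while loop over state (i, p); fuel only makes the recursion total
-- (inside Pre_ the Python loop terminates and the fuel 2*len+2 is never exhausted)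
def loopA (char : String) (n : Int) : Nat → Nat → List Char → List Char
  | 0, _, p => p
  | fuel + 1, i, p =>
    if i < p.length then
      let j := scanA char p i
      if ((j : Int) - (i : Int)) = n then
        loopA char n fuel i (p.take i ++ p.drop j)          -- p = p[:i] + p[j:]
      else
        loopA char n fuel (j + 1) p                          -- i = j + 1
    else p

def remove_if (s : String) (char : String) (n : Int) : String :=
  String.mk (loopA char n (2 * s.toList.length + 2) 0 s.toList)

-- ===== PORT B =====
def altGo (char : String) (n : Int) : List Char → List Char
  | [] => []
  | c :: rest =>
    if String.mk [c] = char then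
      let run := List.takeWhile (fun d => String.mk [d] == char) (c :: rest)
      let rest' := List.dropWhile (fun d => String.mk [d] == char) (c :: rest)
      (if (run.length : Int) = n then [] else run) ++ altGo char n rest'
    else c :: altGo char n rest
termination_by cs => cs.length
decreasing_by
  · simp only [List.dropWhile]
    simp [*]
    exact List.length_dropWhile_le _ _
  · simp

def remove_if_alt (s : String) (char : String) (n : Int) : String :=
  String.mk (altGo char n s.toList)

-- ===== PRECONDITION & SPEC =====
-- Pre_ excludes exactly the inputs on which A's outer loop never terminates
-- (n = 0 together with some character of s that is not `char`: there the
-- removal branch replaces p by itself without advancing i).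
def Pre_remove_if (s : String) (char : String) (n : Int) : Prop :=
  n ≠ 0 ∨ ∀ c ∈ s.toList, String.mk [c] = char
instance (s : String) (char : String) (n : Int) : Decidable (Pre_remove_if s char n) := by unfold Pre_remove_if; infer_instance

def pvWitness_remove_if : String × String × Int := ("aabaa", "a", 2)

def Spec_remove_if (s : String) (char : String) (n : Int) (out : String) : Prop := out = remove_if_alt s char n
instance (s : String) (char : String) (n : Int) (out : String) : Decidable (Spec_remove_if s char n out) := by unfold Spec_remove_if; infer_instance

-- ===== CLAIM (what is proved, stated in full; the proofs are below) =====
def Claim_equal_remove_if : Prop := ∀ (s : String) (char : String) (n : Int), Dom_remove_if s char n → Pre_remove_if s char n → Spec_remove_if s char n (remove_if s char n)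

-- ===== LEMMAS AND PROOFS =====

lemma scanA_append (char : String) (cs : List Char) :
    ∀ done : List Char, scanA char (done ++ cs) done.length
      = done.length + (cs.takeWhile (fun d => String.mk [d] == char)).length := by
  induction cs with
  | nil => intro done; rw [scanA]; simp
  | cons c rest ih =>
    intro done
    rw [scanA]
    have hlt : done.length < (done ++ c :: rest).length := by simp
    have hget : (done ++ c :: rest)[done.length]'hlt = c := by
      simp [List.getElem_append_right]
    rw [dif_pos hlt, hget]
    by_cases hc : String.mk [c] = char
    · rw [if_pos hc]
      have h2 := ih (done ++ [c])
      simp only [List.append_assoc, List.singleton_append, List.length_append,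
        List.length_cons, List.length_nil] at h2
      rw [show done.length + 1 = done.length + (0 + 1) by omega, h2]
      simp [List.takeWhile_cons, hc]
      omega
    · rw [if_neg hc]
      simp [List.takeWhile_cons, hc]

lemma dropWhile_ne_char {char : String} {rest' : List Char} {d : Char} {t : List Char}
    (cs : List Char)
    (h : cs.dropWhile (fun x => String.mk [x] == char) = rest')
    (hd : rest' = d :: t) : ¬ (String.mk [d] = char) := by
  subst hd
  have := List.head?_dropWhile_not (p := fun x => String.mk [x] == char) (l := cs)
  rw [h] at this
  simpa using this

lemma altGo_cons_ne (char : String) (n : Int) (d : Char) (t : List Char)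
    (hd : ¬ String.mk [d] = char) : altGo char n (d :: t) = d :: altGo char n t := by
  rw [altGo, if_neg hd]

lemma loopA_main (char : String) (n : Int) :
    ∀ fuel cs done, (n ≠ 0 ∨ ∀ c ∈ cs, String.mk [c] = char) →
      2 * cs.length + 1 ≤ fuel →
      loopA char n fuel done.length (done ++ cs) = done ++ altGo char n cs := by
  intro fuel
  induction fuel with
  | zero => intro cs done _ hf; omega
  | succ fuel ih =>
    intro cs done H hf
    match cs with
    | [] =>
      rw [loopA]; simp [altGo]
    | c :: rest =>
      have hlt : done.length < (done ++ c :: rest).length := by simp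
      rw [loopA, if_pos hlt]
      have hscan := scanA_append char (c :: rest) done
      set pr : Char → Bool := (fun d => String.mk [d] == char) with hpr
      set t := ((c :: rest).takeWhile pr).length with ht
      have hsplit : (c :: rest).takeWhile pr ++ (c :: rest).dropWhile pr = c :: rest :=
        List.takeWhile_append_dropWhile
      have hdroplen : ((c :: rest).dropWhile pr).length = (c :: rest).length - t := by
        have := congrArg List.length hsplit
        simp only [List.length_append] at this
        omega
      have htle : t ≤ (c :: rest).length := by
        have := congrArg List.length hsplit
        simp only [List.length_append] at this
        omega
      by_cases hc : String.mk [c] = char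
      · -- run case: t ≥ 1
        have hprc : pr c = true := by simp [hpr, hc]
        have ht1 : 1 ≤ t := by
          rw [ht, List.takeWhile_cons, hprc]; simp
        by_cases hn : ((t : Int)) = n
        · -- removal branch: j - i = t = n
          rw [hscan]
          have : ((done.length + t : Nat) : Int) - (done.length : Int) = n := by
            push_cast; omega
          rw [if_pos this]
          have hdrop : (done ++ c :: rest).drop (done.length + t) = (c :: rest).dropWhile pr := by
            rw [List.drop_append]
            have h1 : List.drop (done.length + t) done = [] := by
              apply List.drop_eq_nil_of_le; omega
            have hdw : List.drop t (c :: rest) = List.dropWhile pr (c :: rest) := by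
              conv_lhs => rw [← hsplit]
              rw [ht, List.drop_append, List.drop_length, List.nil_append, Nat.sub_self,
                List.drop_zero]
            rw [h1, List.nil_append, show done.length + t - done.length = t by omega, hdw]
          have htake : (done ++ c :: rest).take done.length = done := by
            simp
          rw [htake, hdrop]
          have hN : n ≠ 0 := by omega
          have hrec := ih ((c :: rest).dropWhile pr) done (Or.inl hN) (by omega)
          rw [hrec]
          rw [show altGo char n (c :: rest) = (if ((((c :: rest).takeWhile pr).length : Int)) = n then [] else (c :: rest).takeWhile pr) ++ altGo char n ((c :: rest).dropWhile pr) by rw [altGo, if_pos hc]]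
          rw [← ht, if_pos hn]
          simp
        · -- kept branch: i = j + 1
          rw [hscan]
          have hne : ((done.length + t : Nat) : Int) - (done.length : Int) ≠ n := by
            push_cast; omega
          rw [if_neg hne]
          rcases hrest' : (c :: rest).dropWhile pr with _ | ⟨d, rest2⟩
          · -- run reaches end of string: loop index past length, loop ends
            have htall : (c :: rest).takeWhile pr = c :: rest := by
              have h := hsplit
              rw [hrest', List.append_nil] at h
              exact h
            have hteq : t = (c :: rest).length := by rw [ht, htall]
            cases fuel with
            | zero => simp at hf
            | succ fuel =>
              rw [loopA]
              have : ¬ (done.length + t + 1 < (done ++ c :: rest).length) := by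
                simp [hteq]
              rw [if_neg this]
              rw [show altGo char n (c :: rest) = (if ((((c :: rest).takeWhile pr).length : Int)) = n then [] else (c :: rest).takeWhile pr) ++ altGo char n ((c :: rest).dropWhile pr) by rw [altGo, if_pos hc]]
              rw [← ht, if_neg hn, hrest', htall]
              simp [altGo]
          · have hd : ¬ String.mk [d] = char := dropWhile_ne_char (c :: rest) hrest' rfl
            have hlen2 : t + 1 + rest2.length = (c :: rest).length := by
              have h := congrArg List.length hsplit
              rw [hrest'] at h
              simp only [List.length_append, List.length_cons] at h
              rw [ht]
              simp only [List.length_cons]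
              omega
            have hN : n ≠ 0 := by
              rcases H with h | h
              · exact h
              · exact absurd (h d (by
                  have hm : d ∈ (c :: rest).dropWhile pr := by rw [hrest']; simp
                  exact (List.dropWhile_sublist pr).mem hm)) hd
            have heq : done.length + t + 1 = (done ++ (c :: rest).takeWhile pr ++ [d]).length := by
              simp [ht]
              omega
            have hpsplit : done ++ c :: rest = (done ++ (c :: rest).takeWhile pr ++ [d]) ++ rest2 := by
              conv_lhs => rw [← hsplit]
              rw [hrest']
              simp
            rw [heq, hpsplit]
            rw [ih rest2 (done ++ (c :: rest).takeWhile pr ++ [d]) (Or.inl hN) (by omega)]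
            rw [show altGo char n (c :: rest) = (if ((((c :: rest).takeWhile pr).length : Int)) = n then [] else (c :: rest).takeWhile pr) ++ altGo char n ((c :: rest).dropWhile pr) by rw [altGo, if_pos hc]]
            rw [← ht, if_neg hn, hrest', altGo_cons_ne char n d rest2 hd]
            simp
      · -- first char is not `char`: t = 0, j = i, branch on 0 = n
        have hprc : pr c = false := by simp [hpr, hc]
        have ht0 : t = 0 := by rw [ht, List.takeWhile_cons, hprc]; simp
        have hN : n ≠ 0 := by
          rcases H with h | h
          · exact h
          · exact absurd (h c (by simp)) hc
        rw [hscan, ht0]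
        have hne : ((done.length + 0 : Nat) : Int) - (done.length : Int) ≠ n := by
          push_cast; omega
        rw [if_neg hne]
        have heq : done.length + 0 + 1 = (done ++ [c]).length := by simp
        have hpsplit : done ++ c :: rest = (done ++ [c]) ++ rest := by simp
        rw [heq, hpsplit]
        rw [ih rest (done ++ [c]) (Or.inl hN) (by simp at hf ⊢; omega)]
        rw [altGo, if_neg hc]
        simp

-- ===== VERDICT (by name: the statement is the Claim_ definition above) =====
theorem remove_if_spec : Claim_equal_remove_if := by
  intro s char n _ hpre
  unfold Pre_remove_if at hpre
  unfold Spec_remove_if remove_if remove_if_alt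
  have h := loopA_main char n (2 * s.toList.length + 2) s.toList [] hpre (by omega)
  simp only [List.length_nil, List.nil_append] at h
  rw [h]
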